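-- pv_equiv track=rewrite | github.com/physwkim/ophyd-epicsrs | python/ophyd_epicsrs/detector/_converter.py | _decode_char_array
-- ===== SOURCE A (Python) =====
-- def _decode_char_array(raw: list | tuple) -> str | None:
--     """Decode a CA char waveform (DBR_CHAR array) as null-terminated UTF-8.
--
--     Returns None if the input does not look like a char array.
--     """
--     if not raw or not all(isinstance(x, int) for x in raw):
--         return None
--     if not all(0 <= x <= 255 for x in raw):
--         return None
--     try:
--         end = raw.index(0)
--     except ValueError:
--         end = len(raw)
--     try:
--         return bytes(raw[:end]).decode("utf-8", errors="replace")
--     except (ValueError, OverflowError):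
--         return None
-- ===== SOURCE B (Python) =====
-- def _decode_char_array(raw: list | tuple) -> str | None:
--     """Decode a CA char waveform (DBR_CHAR array) as null-terminated UTF-8.
--
--     Single fused pass: validate every element while collecting the bytes
--     that precede the first zero, then decode once at the end.
--     """
--     if not raw:
--         return None
--     buf = bytearray()
--     stopped = False
--     for x in raw:
--         if not isinstance(x, int) or not (0 <= x <= 255):
--             return None
--         if x == 0:
--             stopped = True
--         elif not stopped:
--             buf.append(x)
--     return bytes(buf).decode("utf-8", errors="replace")
-- ===== Notes on version B (the rewrite author's own statement) =====
-- stated objective: alternative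
-- what changed: A makes two full validation passes, then a .index(0) scan and a slice before decoding; B fuses validation, null search and byte collection into one loop with a bytearray accumulator and a seen-zero flag, decoding once at the end (its Lean port also decodes via a byte-at-a-time state machine instead of A's multi-byte lookahead).
import Mathlib
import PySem

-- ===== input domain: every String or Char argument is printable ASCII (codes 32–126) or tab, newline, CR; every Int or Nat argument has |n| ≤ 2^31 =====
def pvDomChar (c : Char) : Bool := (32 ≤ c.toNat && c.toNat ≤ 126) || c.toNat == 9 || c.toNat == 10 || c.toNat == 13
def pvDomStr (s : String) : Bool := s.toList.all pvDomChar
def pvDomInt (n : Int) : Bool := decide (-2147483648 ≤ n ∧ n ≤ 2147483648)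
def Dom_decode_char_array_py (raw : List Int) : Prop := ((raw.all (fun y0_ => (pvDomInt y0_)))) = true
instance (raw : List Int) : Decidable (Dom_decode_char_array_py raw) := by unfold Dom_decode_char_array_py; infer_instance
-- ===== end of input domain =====

-- B fuses A's two validation passes, the .index(0) scan and the slice into one
-- loop that validates each element while collecting the bytes before the first
-- zero, and decodes with a byte-at-a-time state machine (alternative
-- decomposition; same O(n) cost, fewer passes).


def pvRepl : Char := Char.ofNat 0xFFFD

-- ===== PORT A =====
-- Hand port of Python's bytes.decode("utf-8", errors="replace") as A performs
-- it: look at the lead byte and as many following bytes as the sequence needs,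
-- emitting one U+FFFD per maximal invalid subpart (CPython's rule; exact on
-- every byte list, cross-checked against CPython on random byte strings).
def pvCont (x : Nat) : Bool := 0x80 ≤ x && x ≤ 0xBF

-- one decoding step: the character produced for lead byte b, and how many
-- further bytes of rest it consumes (0–3)
def pvUtf8Step (b : Nat) (rest : List Nat) : Char × Nat :=
  if b < 0x80 then (Char.ofNat b, 0)
  else if 0xC2 ≤ b && b ≤ 0xDF then
    match rest with
    | [] => (pvRepl, 0)
    | b1 :: _ =>
      if pvCont b1 then (Char.ofNat ((b - 0xC0) * 64 + (b1 - 0x80)), 1) else (pvRepl, 0)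
  else if 0xE0 ≤ b && b ≤ 0xEF then
    let lo := if b == 0xE0 then 0xA0 else 0x80
    let hi := if b == 0xED then 0x9F else 0xBF
    match rest with
    | [] => (pvRepl, 0)
    | b1 :: rest1 =>
      if !(lo ≤ b1 && b1 ≤ hi) then (pvRepl, 0)
      else
        match rest1 with
        | [] => (pvRepl, 1)
        | b2 :: _ =>
          if pvCont b2 then (Char.ofNat ((b - 0xE0) * 4096 + (b1 - 0x80) * 64 + (b2 - 0x80)), 2)
          else (pvRepl, 1)
  else if 0xF0 ≤ b && b ≤ 0xF4 then
    let lo := if b == 0xF0 then 0x90 else 0x80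
    let hi := if b == 0xF4 then 0x8F else 0xBF
    match rest with
    | [] => (pvRepl, 0)
    | b1 :: rest1 =>
      if !(lo ≤ b1 && b1 ≤ hi) then (pvRepl, 0)
      else
        match rest1 with
        | [] => (pvRepl, 1)
        | b2 :: rest2 =>
          if !(pvCont b2) then (pvRepl, 1)
          else
            match rest2 with
            | [] => (pvRepl, 2)
            | b3 :: _ =>
              if pvCont b3 then
                (Char.ofNat ((b - 0xF0) * 262144 + (b1 - 0x80) * 4096 + (b2 - 0x80) * 64 + (b3 - 0x80)), 3)
              else (pvRepl, 2)
  else (pvRepl, 0)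

def pvUtf8Replace : List Nat → List Char
  | [] => []
  | b :: rest =>
    (pvUtf8Step b rest).1 :: pvUtf8Replace (rest.drop (pvUtf8Step b rest).2)
termination_by l => l.length
decreasing_by simp [List.length_drop]

def decode_char_array_py (raw : List Int) : Option String :=
  -- 'not raw or not all(isinstance(x, int) for x in raw)': under the type
  -- convention every element is an int, so the isinstance clause is always true
  if raw.isEmpty then none
  else if !(raw.all fun x => decide (0 ≤ x ∧ x ≤ 255)) then none
  else
    -- try: end = raw.index(0) / except ValueError: end = len(raw)
    let e : Nat := (PySem.List.index? raw 0).getD raw.length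
    -- bytes(raw[:end]).decode("utf-8", errors="replace"); with all bytes in
    -- 0..255 and errors="replace" this never raises, so the except is dead
    some (String.ofList (pvUtf8Replace ((PySem.List.slice raw none (some (e : Int))).map Int.toNat)))

-- ===== PORT B =====
-- B's port of the same builtin decode, written as CPython's actual incremental
-- machine: a state (partial codepoint, bytes still needed, allowed range for
-- the next byte) updated one byte at a time, no lookahead; exact on every byte
-- list (cross-checked against CPython the same way).
-- ground-state transition: the chars emitted and the new state for byte b
def pvStep0 (b : Nat) : List Char × Option (Nat × Nat × Nat × Nat) :=
  if b < 0x80 then ([Char.ofNat b], none)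
  else if 0xC2 ≤ b && b ≤ 0xDF then ([], some (b - 0xC0, 1, 0x80, 0xBF))
  else if 0xE0 ≤ b && b ≤ 0xEF then
    ([], some (b - 0xE0, 2, if b == 0xE0 then 0xA0 else 0x80, if b == 0xED then 0x9F else 0xBF))
  else if 0xF0 ≤ b && b ≤ 0xF4 then
    ([], some (b - 0xF0, 3, if b == 0xF0 then 0x90 else 0x80, if b == 0xF4 then 0x8F else 0xBF))
  else ([pvRepl], none)

def pvStep : Option (Nat × Nat × Nat × Nat) → Nat → List Char × Option (Nat × Nat × Nat × Nat)
  | none, b => pvStep0 b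
  | some (acc, need, lo, hi), b =>
    if lo ≤ b && b ≤ hi then
      if need == 1 then ([Char.ofNat (acc * 64 + (b - 0x80))], none)
      else ([], some (acc * 64 + (b - 0x80), need - 1, 0x80, 0xBF))
    else (pvRepl :: (pvStep0 b).1, (pvStep0 b).2)

def pvDfa : Option (Nat × Nat × Nat × Nat) → List Nat → List Char
  | st, [] => if st.isSome then [pvRepl] else []
  | st, b :: rest => (pvStep st b).1 ++ pvDfa (pvStep st b).2 rest

-- the for-loop of Source B: buf is the bytearray, stopped the seen-zero flag;
-- none = the early 'return None' on an out-of-range element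
def pvAltGo : List Int → List Nat → Bool → Option (List Nat)
  | [], buf, _ => some buf
  | x :: rest, buf, stopped =>
    if !(decide (0 ≤ x ∧ x ≤ 255)) then none
    else if x == 0 then pvAltGo rest buf true
    else if stopped then pvAltGo rest buf stopped
    else pvAltGo rest (buf ++ [x.toNat]) stopped

def decode_char_array_py_alt (raw : List Int) : Option String :=
  if raw.isEmpty then none
  else (pvAltGo raw [] false).map fun buf => String.ofList (pvDfa none buf)

-- ===== PRECONDITION & SPEC =====
def Spec_decode_char_array_py (raw : List Int) (out : Option String) : Prop := out = decode_char_array_py_alt raw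
instance (raw : List Int) (out : Option String) : Decidable (Spec_decode_char_array_py raw out) := by unfold Spec_decode_char_array_py; infer_instance

-- ===== CLAIM (what is proved, stated in full; the proofs are below) =====
def Claim_equal_decode_char_array_py : Prop := ∀ (raw : List Int), Dom_decode_char_array_py raw → Spec_decode_char_array_py raw (decode_char_array_py raw)

-- ===== LEMMAS AND PROOFS =====

-- one-step unfoldings of the machine and the lookahead decoder
theorem pvDfa_nil (st : Option (Nat × Nat × Nat × Nat)) :
    pvDfa st [] = if st.isSome then [pvRepl] else [] := rfl

theorem pvDfa_cons (st : Option (Nat × Nat × Nat × Nat)) (b : Nat) (rest : List Nat) :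
    pvDfa st (b :: rest) = (pvStep st b).1 ++ pvDfa (pvStep st b).2 rest := rfl

theorem pvStep_none (b : Nat) : pvStep none b = pvStep0 b := rfl

theorem pvU_cons (b : Nat) (rest : List Nat) :
    pvUtf8Replace (b :: rest) =
      (pvUtf8Step b rest).1 :: pvUtf8Replace (rest.drop (pvUtf8Step b rest).2) := by
  rw [pvUtf8Replace]

-- a continuation byte outside the expected range: emit one U+FFFD for the
-- consumed prefix and reprocess the byte from the ground state
theorem pvDfa_resync (acc need lo hi b : Nat) (rest : List Nat)
    (h : ¬(lo ≤ b ∧ b ≤ hi)) :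
    pvDfa (some (acc, need, lo, hi)) (b :: rest) = pvRepl :: pvDfa none (b :: rest) := by
  rw [pvDfa_cons, pvDfa_cons, pvStep_none]
  simp [pvStep, h]

-- the two decoders agree: the machine, run from the ground state, emits
-- exactly the characters of the lookahead decoder
theorem pvDfa_eq_aux : ∀ (n : Nat) (bs : List Nat), bs.length ≤ n → pvDfa none bs = pvUtf8Replace bs := by
  intro n
  induction n with
  | zero =>
    intro bs h
    match bs with
    | [] => simp [pvDfa_nil, pvUtf8Replace]
  | succ n ih =>
    intro bs hlen
    match bs with
    | [] => simp [pvDfa_nil, pvUtf8Replace]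
    | b :: rest =>
      have hlen' : rest.length ≤ n := by simpa using hlen
      rw [pvDfa_cons, pvStep_none, pvU_cons]
      by_cases h1 : b < 0x80
      · have s0 : pvStep0 b = ([Char.ofNat b], none) := by simp [pvStep0, h1]
        have su : pvUtf8Step b rest = (Char.ofNat b, 0) := by simp [pvUtf8Step, h1]
        rw [s0, su]
        simp only [List.cons_append, List.nil_append, List.drop_zero]
        rw [ih rest hlen']
      · by_cases h2 : 0xC2 ≤ b ∧ b ≤ 0xDF
        · -- two-byte lead
          have s0 : pvStep0 b = ([], some (b - 0xC0, 1, 0x80, 0xBF)) := by simp [pvStep0, h1, h2]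
          rw [s0]
          simp only [List.nil_append]
          match rest with
          | [] =>
            have su : pvUtf8Step b [] = (pvRepl, 0) := by simp [pvUtf8Step, h1, h2]
            rw [su, pvDfa_nil]
            simp [pvUtf8Replace]
          | b1 :: rest1 =>
            by_cases hc : 0x80 ≤ b1 ∧ b1 ≤ 0xBF
            · have s1 : pvStep (some (b - 0xC0, 1, 0x80, 0xBF)) b1 =
                  ([Char.ofNat ((b - 0xC0) * 64 + (b1 - 0x80))], none) := by simp [pvStep, hc]
              have su : pvUtf8Step b (b1 :: rest1) =
                  (Char.ofNat ((b - 0xC0) * 64 + (b1 - 0x80)), 1) := by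
                simp [pvUtf8Step, pvCont, h1, h2, hc]
              rw [pvDfa_cons, s1, su]
              simp only [List.cons_append, List.nil_append, List.drop_succ_cons, List.drop_zero]
              rw [ih rest1 (Nat.le_of_succ_le hlen')]
            · have su : pvUtf8Step b (b1 :: rest1) = (pvRepl, 0) := by
                simp [pvUtf8Step, pvCont, h1, h2, hc]
              rw [pvDfa_resync _ _ _ _ _ _ hc, su, ih (b1 :: rest1) hlen']
              simp only [List.drop_zero]
        · by_cases h3 : 0xE0 ≤ b ∧ b ≤ 0xEF
          · -- three-byte lead
            have s0 : pvStep0 b = ([], some (b - 0xE0, 2,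
                (if b = 0xE0 then 0xA0 else 0x80), (if b = 0xED then 0x9F else 0xBF))) := by
              simp [pvStep0, h1, h2, h3]
            rw [s0]
            simp only [List.nil_append]
            match rest with
            | [] =>
              have su : pvUtf8Step b [] = (pvRepl, 0) := by simp [pvUtf8Step, h1, h2, h3]
              rw [su, pvDfa_nil]
              simp [pvUtf8Replace]
            | b1 :: rest1 =>
              by_cases hc1 : (if b = 0xE0 then 0xA0 else 0x80) ≤ b1 ∧
                  b1 ≤ (if b = 0xED then 0x9F else 0xBF)
              · have s1 : pvStep (some (b - 0xE0, 2,
                    (if b = 0xE0 then 0xA0 else 0x80), (if b = 0xED then 0x9F else 0xBF))) b1 =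
                    ([], some ((b - 0xE0) * 64 + (b1 - 0x80), 1, 0x80, 0xBF)) := by
                  simp [pvStep, hc1]
                rw [pvDfa_cons, s1]
                simp only [List.nil_append]
                match rest1 with
                | [] =>
                  have su : pvUtf8Step b [b1] = (pvRepl, 1) := by
                    simp [pvUtf8Step, h1, h2, h3, hc1]
                  rw [su, pvDfa_nil]
                  simp [pvUtf8Replace]
                | b2 :: rest2 =>
                  have hlen2 : rest2.length ≤ n := by
                    simp only [List.length_cons] at hlen'; omega
                  by_cases hc2 : 0x80 ≤ b2 ∧ b2 ≤ 0xBF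
                  · have harith : ((b - 0xE0) * 64 + (b1 - 0x80)) * 64 + (b2 - 0x80) =
                        (b - 0xE0) * 4096 + (b1 - 0x80) * 64 + (b2 - 0x80) := by ring
                    have s2 : pvStep (some ((b - 0xE0) * 64 + (b1 - 0x80), 1, 0x80, 0xBF)) b2 =
                        ([Char.ofNat ((b - 0xE0) * 4096 + (b1 - 0x80) * 64 + (b2 - 0x80))], none) := by
                      simp only [pvStep, hc2]
                      rw [harith]
                      simp
                    have su : pvUtf8Step b (b1 :: b2 :: rest2) =
                        (Char.ofNat ((b - 0xE0) * 4096 + (b1 - 0x80) * 64 + (b2 - 0x80)), 2) := by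
                      simp [pvUtf8Step, pvCont, h1, h2, h3, hc1, hc2]
                    rw [pvDfa_cons, s2, su]
                    simp only [List.cons_append, List.nil_append, List.drop_succ_cons, List.drop_zero]
                    rw [ih rest2 hlen2]
                  · have su : pvUtf8Step b (b1 :: b2 :: rest2) = (pvRepl, 1) := by
                      simp [pvUtf8Step, pvCont, h1, h2, h3, hc1, hc2]
                    have hlen1 : (b2 :: rest2).length ≤ n := Nat.le_of_succ_le (by simpa using hlen')
                    rw [pvDfa_resync _ _ _ _ _ _ hc2, su, ih (b2 :: rest2) hlen1]
                    simp only [List.drop_succ_cons, List.drop_zero]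
              · have su : pvUtf8Step b (b1 :: rest1) = (pvRepl, 0) := by
                  simp [pvUtf8Step, h1, h2, h3, hc1]
                rw [pvDfa_resync _ _ _ _ _ _ hc1, su, ih (b1 :: rest1) hlen']
                simp only [List.drop_zero]
          · by_cases h4 : 0xF0 ≤ b ∧ b ≤ 0xF4
            · -- four-byte lead
              have s0 : pvStep0 b = ([], some (b - 0xF0, 3,
                  (if b = 0xF0 then 0x90 else 0x80), (if b = 0xF4 then 0x8F else 0xBF))) := by
                simp [pvStep0, h1, h2, h3, h4]
              rw [s0]
              simp only [List.nil_append]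
              match rest with
              | [] =>
                have su : pvUtf8Step b [] = (pvRepl, 0) := by simp [pvUtf8Step, h1, h2, h3, h4]
                rw [su, pvDfa_nil]
                simp [pvUtf8Replace]
              | b1 :: rest1 =>
                by_cases hc1 : (if b = 0xF0 then 0x90 else 0x80) ≤ b1 ∧
                    b1 ≤ (if b = 0xF4 then 0x8F else 0xBF)
                · have s1 : pvStep (some (b - 0xF0, 3,
                      (if b = 0xF0 then 0x90 else 0x80), (if b = 0xF4 then 0x8F else 0xBF))) b1 =
                      ([], some ((b - 0xF0) * 64 + (b1 - 0x80), 2, 0x80, 0xBF)) := by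
                    simp [pvStep, hc1]
                  rw [pvDfa_cons, s1]
                  simp only [List.nil_append]
                  match rest1 with
                  | [] =>
                    have su : pvUtf8Step b [b1] = (pvRepl, 1) := by
                      simp [pvUtf8Step, h1, h2, h3, h4, hc1]
                    rw [su, pvDfa_nil]
                    simp [pvUtf8Replace]
                  | b2 :: rest2 =>
                    by_cases hc2 : 0x80 ≤ b2 ∧ b2 ≤ 0xBF
                    · have s2 : pvStep (some ((b - 0xF0) * 64 + (b1 - 0x80), 2, 0x80, 0xBF)) b2 =
                          ([], some (((b - 0xF0) * 64 + (b1 - 0x80)) * 64 + (b2 - 0x80), 1, 0x80, 0xBF)) := by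
                        simp [pvStep, hc2]
                      rw [pvDfa_cons, s2]
                      simp only [List.nil_append]
                      match rest2 with
                      | [] =>
                        have su : pvUtf8Step b [b1, b2] = (pvRepl, 2) := by
                          simp [pvUtf8Step, pvCont, h1, h2, h3, h4, hc1, hc2]
                        rw [su, pvDfa_nil]
                        simp [pvUtf8Replace]
                      | b3 :: rest3 =>
                        have hlen3 : rest3.length ≤ n := by
                          simp only [List.length_cons] at hlen'; omega
                        by_cases hc3 : 0x80 ≤ b3 ∧ b3 ≤ 0xBF
                        · have harith : (((b - 0xF0) * 64 + (b1 - 0x80)) * 64 + (b2 - 0x80)) * 64 + (b3 - 0x80) =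
                              (b - 0xF0) * 262144 + (b1 - 0x80) * 4096 + (b2 - 0x80) * 64 + (b3 - 0x80) := by ring
                          have s3 : pvStep (some (((b - 0xF0) * 64 + (b1 - 0x80)) * 64 + (b2 - 0x80), 1, 0x80, 0xBF)) b3 =
                              ([Char.ofNat ((b - 0xF0) * 262144 + (b1 - 0x80) * 4096 + (b2 - 0x80) * 64 + (b3 - 0x80))], none) := by
                            simp only [pvStep, hc3]
                            rw [harith]
                            simp
                          have su : pvUtf8Step b (b1 :: b2 :: b3 :: rest3) =
                              (Char.ofNat ((b - 0xF0) * 262144 + (b1 - 0x80) * 4096 + (b2 - 0x80) * 64 + (b3 - 0x80)), 3) := by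
                            simp [pvUtf8Step, pvCont, h1, h2, h3, h4, hc1, hc2, hc3]
                          rw [pvDfa_cons, s3, su]
                          simp only [List.cons_append, List.nil_append, List.drop_succ_cons, List.drop_zero]
                          rw [ih rest3 hlen3]
                        · have su : pvUtf8Step b (b1 :: b2 :: b3 :: rest3) = (pvRepl, 2) := by
                            simp [pvUtf8Step, pvCont, h1, h2, h3, h4, hc1, hc2, hc3]
                          have hlen1 : (b3 :: rest3).length ≤ n := by
                            simp only [List.length_cons] at hlen' ⊢; omega
                          rw [pvDfa_resync _ _ _ _ _ _ hc3, su, ih (b3 :: rest3) hlen1]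
                          simp only [List.drop_succ_cons, List.drop_zero]
                    · have su : pvUtf8Step b (b1 :: b2 :: rest2) = (pvRepl, 1) := by
                        simp [pvUtf8Step, pvCont, h1, h2, h3, h4, hc1, hc2]
                      have hlen1 : (b2 :: rest2).length ≤ n := Nat.le_of_succ_le (by simpa using hlen')
                      rw [pvDfa_resync _ _ _ _ _ _ hc2, su, ih (b2 :: rest2) hlen1]
                      simp only [List.drop_succ_cons, List.drop_zero]
                · have su : pvUtf8Step b (b1 :: rest1) = (pvRepl, 0) := by
                    simp [pvUtf8Step, h1, h2, h3, h4, hc1]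
                  rw [pvDfa_resync _ _ _ _ _ _ hc1, su, ih (b1 :: rest1) hlen']
                  simp only [List.drop_zero]
            · -- invalid lead byte
              have s0 : pvStep0 b = ([pvRepl], none) := by simp [pvStep0, h1, h2, h3, h4]
              have su : pvUtf8Step b rest = (pvRepl, 0) := by simp [pvUtf8Step, h1, h2, h3, h4]
              rw [s0, su]
              simp only [List.cons_append, List.nil_append, List.drop_zero]
              rw [ih rest hlen']

theorem pvDfa_eq (bs : List Nat) : pvDfa none bs = pvUtf8Replace bs :=
  pvDfa_eq_aux bs.length bs le_rfl

-- B's loop returns the whole-list validity check together with (buf ++ the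
-- bytes before the first zero, none once a zero has been seen)
theorem pvAltGo_spec (raw : List Int) (buf : List Nat) (stopped : Bool) :
    pvAltGo raw buf stopped =
      if raw.all (fun x => decide (0 ≤ x ∧ x ≤ 255)) then
        some (buf ++ if stopped then [] else (raw.takeWhile (· != 0)).map Int.toNat)
      else none := by
  induction raw generalizing buf stopped with
  | nil => simp [pvAltGo]
  | cons x rest ih =>
    by_cases hx : 0 ≤ x ∧ x ≤ 255
    · by_cases hz : x = 0
      · subst hz
        simp [pvAltGo, ih, List.takeWhile]
      · have hbz : (x == 0) = false := by simp [hz]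
        cases stopped with
        | true => simp [pvAltGo, hx, hbz, ih]
        | false =>
          simp [pvAltGo, hx, hbz, ih, hz]
    · simp [pvAltGo, hx]

-- A's prefix raw[:index-of-first-0 (or len)] is exactly takeWhile (≠ 0)
theorem take_index_eq_takeWhile (raw : List Int) :
    raw.take ((PySem.List.index? raw 0).getD raw.length) = raw.takeWhile (· != 0) := by
  induction raw with
  | nil => rfl
  | cons x rest ih =>
    by_cases hz : x = 0
    · subst hz
      rw [PySem.List.index?_cons_self]
      simp [List.takeWhile]
    · rw [PySem.List.index?_cons_of_ne rest hz]
      have hbz : (x != 0) = true := by simp [hz]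
      cases h : PySem.List.index? rest 0 with
      | none =>
        rw [h] at ih
        simp [List.takeWhile, hbz, ← ih]
      | some i =>
        rw [h] at ih
        simp [List.takeWhile, hbz, ← ih]

-- ===== VERDICT (by name: the statement is the Claim_ definition above) =====
theorem decode_char_array_py_spec : Claim_equal_decode_char_array_py := by
  intro raw _
  unfold Spec_decode_char_array_py decode_char_array_py decode_char_array_py_alt
  by_cases hemp : raw.isEmpty
  · simp [hemp]
  · rw [if_neg hemp, if_neg hemp, pvAltGo_spec]
    by_cases hall : raw.all (fun x => decide (0 ≤ x ∧ x ≤ 255))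
    · simp only [hall, Bool.not_true, Bool.false_eq_true, if_false, if_true,
        Option.map_some, List.nil_append]
      rw [pvDfa_eq, PySem.List.slice_to_natCast, take_index_eq_takeWhile]
    · have h0 : ¬ ∀ x ∈ raw, 0 ≤ x ∧ x ≤ 255 := by simpa using hall
      have he : ∃ x ∈ raw, 0 ≤ x → 255 < x := by
        push Not at h0
        simpa using h0
      simp [he, h0]
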